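-- pv_equiv track=rewrite | github.com/Prisol7/Assignment-7 | problem_3.py | count_hires_in_array
-- ===== SOURCE A (Python) =====
-- def count_hires_in_array(ranks):
--     if not ranks:
--         return 0
--     hires = 1
--     best_rank_so_far = ranks[0]
--     for i in range(1, len(ranks)):
--         current_rank = ranks[i]
--
--         if current_rank < best_rank_so_far:
--             hires += 1
--             best_rank_so_far = current_rank
--
--     return hires
-- ===== SOURCE B (Python) =====
-- def count_hires_in_array(ranks):
--     # Build the prefix-minimum table, then count its distinct values.
--     if not ranks:
--         return 0
--     mins = [ranks[0]]
--     for r in ranks[1:]: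
--         mins.append(min(mins[-1], r))
--     return len(set(mins))
-- ===== Notes on version B (the rewrite author's own statement) =====
-- stated objective: alternative
-- what changed: B builds the prefix-minimum table of ranks and returns the number of distinct values in it (via set), instead of A's single running-best loop with a counter.
import Mathlib
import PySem

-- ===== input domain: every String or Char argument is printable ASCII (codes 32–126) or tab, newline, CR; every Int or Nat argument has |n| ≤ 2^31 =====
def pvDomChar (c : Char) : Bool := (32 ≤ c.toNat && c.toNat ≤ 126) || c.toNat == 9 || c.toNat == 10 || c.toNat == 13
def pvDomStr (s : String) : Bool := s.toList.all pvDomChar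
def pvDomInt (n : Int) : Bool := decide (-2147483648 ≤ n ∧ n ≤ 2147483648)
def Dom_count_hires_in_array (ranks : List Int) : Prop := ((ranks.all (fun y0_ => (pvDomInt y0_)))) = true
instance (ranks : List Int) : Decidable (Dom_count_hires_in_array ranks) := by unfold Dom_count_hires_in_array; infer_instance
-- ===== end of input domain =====

-- B counts the distinct values of the prefix-minimum table instead of counting running-minimum updates (alternative decomposition, same cost).

-- ===== PORT A =====
def count_hires_in_array (ranks : List Int) : Int :=
  if ranks = [] then 0
  else
    (((PySem.List.pyRange 1 (ranks.length : Int) 1).foldl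
      (fun (st : Int × Int) i =>
        if PySem.List.pyGetD ranks i 0 < st.2 then (st.1 + 1, PySem.List.pyGetD ranks i 0) else st)
      (1, PySem.List.pyGetD ranks 0 0)).1)

-- ===== PORT B =====
def count_hires_in_array_alt (ranks : List Int) : Int :=
  match ranks with
  | [] => 0
  | h :: t =>
    let mins := t.foldl (fun mins r => mins ++ [min (PySem.List.pyGetD mins (-1) 0) r]) [h]
    ((PySem.Set.ofList mins).length : Int)

-- ===== PRECONDITION & SPEC =====
def Spec_count_hires_in_array (ranks : List Int) (out : Int) : Prop := out = count_hires_in_array_alt ranks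
instance (ranks : List Int) (out : Int) : Decidable (Spec_count_hires_in_array ranks out) := by unfold Spec_count_hires_in_array; infer_instance

-- ===== CLAIM (what is proved, stated in full; the proofs are below) =====
def Claim_equal_count_hires_in_array : Prop := ∀ (ranks : List Int), Dom_count_hires_in_array ranks → Spec_count_hires_in_array ranks (count_hires_in_array ranks)

-- ===== LEMMAS AND PROOFS =====

-- proof helper: the prefix-minimum table starting from best
def prefixMins (best : Int) : List Int → List Int
  | [] => [best]
  | x :: xs => best :: prefixMins (min best x) xs

lemma pyGetD_last (pre : List Int) (b : Int) :
    PySem.List.pyGetD (pre ++ [b]) (-1) 0 = b := by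
  simp [PySem.List.pyGetD, PySem.List.pyGet?, PySem.List.pyIdx?, PySem.List.len]

-- B's append loop builds exactly the prefix-minimum table
lemma foldl_mins (t : List Int) : ∀ (pre : List Int) (b : Int),
    t.foldl (fun mins r => mins ++ [min (PySem.List.pyGetD mins (-1) 0) r]) (pre ++ [b])
      = pre ++ prefixMins b t := by
  induction t with
  | nil => intro pre b; simp [prefixMins]
  | cons x xs ih =>
    intro pre b
    simp only [List.foldl_cons, pyGetD_last]
    rw [show pre ++ [b] ++ [min b x] = (pre ++ [b]) ++ [min b x] from rfl,
        ih (pre ++ [b]) (min b x)]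
    simp [prefixMins]

-- every element of the prefix-min table is ≤ the starting best
lemma prefixMins_le (t : List Int) : ∀ b y, y ∈ prefixMins b t → y ≤ b := by
  induction t with
  | nil => intro b y hy; simp [prefixMins] at hy; omega
  | cons x xs ih =>
    intro b y hy
    simp [prefixMins] at hy
    rcases hy with h | h
    · omega
    · have := ih (min b x) y h; omega

lemma mem_prefixMins_self (b : Int) (t : List Int) : b ∈ prefixMins b t := by
  cases t <;> simp [prefixMins]

-- distinct-count of a list = Finset card of its elements
lemma len_ofList_eq_card (l : List Int) :
    ((PySem.Set.ofList l).length : Int) = (l.toFinset.card : Int) := by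
  have h1 : (PySem.Set.ofList l).length = (PySem.Set.ofList l).toFinset.card :=
    (List.toFinset_card_of_nodup (PySem.Set.nodup_ofList l)).symm
  have h2 : (PySem.Set.ofList l).toFinset = l.toFinset := by
    ext y; simp [PySem.Set.mem_ofList]
  rw [h1, h2]

-- loop invariant: A's fold over the tail computes the distinct-count of the prefix-min table
lemma fold_eq_card (t : List Int) : ∀ (b hires : Int),
    (t.foldl (fun (st : Int × Int) r => if r < st.2 then (st.1 + 1, r) else st) (hires, b)).1
      = hires - 1 + ((prefixMins b t).toFinset.card : Int) := by
  induction t with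
  | nil => intro b hires; simp [prefixMins]
  | cons x xs ih =>
    intro b hires
    simp only [List.foldl_cons]
    by_cases hx : x < b
    · rw [if_pos hx]
      have hmin : min b x = x := by omega
      have hnot : b ∉ prefixMins x xs := by
        intro hmem
        have := prefixMins_le xs x b hmem; omega
      have : (prefixMins b (x :: xs)).toFinset = insert b (prefixMins x xs).toFinset := by
        simp [prefixMins, hmin]
      rw [this, Finset.card_insert_of_notMem (by simpa using hnot), ih x (hires + 1)]
      push_cast; ring
    · rw [if_neg hx]
      have hmin : min b x = b := by omega
      have : (prefixMins b (x :: xs)).toFinset = (prefixMins b xs).toFinset := by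
        rw [show prefixMins b (x :: xs) = b :: prefixMins b xs from by simp [prefixMins, hmin]]
        rw [List.toFinset_cons]
        exact Finset.insert_eq_self.mpr (List.mem_toFinset.mpr (mem_prefixMins_self b xs))
      rw [this, ih b hires]

-- ===== VERDICT (by name: the statement is the Claim_ definition above) =====
theorem count_hires_in_array_spec : Claim_equal_count_hires_in_array := by
  intro ranks _
  unfold Spec_count_hires_in_array count_hires_in_array count_hires_in_array_alt
  cases ranks with
  | nil => simp
  | cons h t =>
    rw [if_neg (by simp)]
    have hfold := PySem.List.foldl_pyRange_pyGetD (xs := h :: t) (a := 1)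
      (f := fun (st : Int × Int) r => if r < st.2 then (st.1 + 1, r) else st)
      (d := 0) (init := ((1 : Int), PySem.List.pyGetD (h :: t) 0 0)) (by omega)
    simp only [PySem.List.pyGetD] at *
    simp only [PySem.List.len] at hfold
    rw [hfold]
    simp only [Int.toNat_one, List.drop_succ_cons, List.drop_zero]
    have : PySem.List.pyGetD (h :: t) 0 0 = h := by simp
    simp only [PySem.List.pyGetD] at this
    rw [this, fold_eq_card t h 1, len_ofList_eq_card]
    have hm := foldl_mins t [] h
    simp only [PySem.List.pyGetD] at hm
    rw [show ([h] : List Int) = [] ++ [h] from rfl, hm]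
    simp
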